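-- pv_equiv track=rewrite | github.com/Bloodlust031/Git_Perso | Python_Eclipse/ProjetPython/TestJson/OBD_PID_analysis.py | Fusion_Mapping_PID
-- ===== SOURCE A (Python) =====
-- def Masque_OU(car_a, car_b):
--     car_result = hex(int(car_a,16)|int(car_b,16)).lstrip("0x")
--     if len(car_result) == 0:
--         car_result = "0"
--     return car_result
--
-- def Fusion_Mapping_PID(st_Mapping_old, st_Mapping_new):
--     st_temp = ""
--     if (len(st_Mapping_new) == 64):
--         if (len(st_Mapping_old) != 64):
--             st_temp = st_Mapping_new
--         else:
--             for i in range(0, len(st_Mapping_old)):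
--                 st_temp = st_temp + Masque_OU(st_Mapping_old[i:i+1],st_Mapping_new[i:i+1])
--     else:
--         st_temp = st_Mapping_old
--     return st_temp
-- ===== SOURCE B (Python) =====
-- _HEXVAL = {c: i for i, c in enumerate("0123456789abcdef")}
-- _HEXVAL.update({c: i for i, c in enumerate("0123456789ABCDEF")})
--
--
-- def _hex_value(s):
--     v = 0
--     for c in s:
--         v = 16 * v + _HEXVAL[c]
--     return v
--
--
-- def _format64(v):
--     digits = "0123456789abcdef"
--     out = []
--     for _ in range(64):
--         out.append(digits[v & 15])
--         v >>= 4
--     out.reverse()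
--     return "".join(out)
--
--
-- def Fusion_Mapping_PID(st_Mapping_old, st_Mapping_new):
--     if len(st_Mapping_new) != 64:
--         return st_Mapping_old
--     if len(st_Mapping_old) != 64:
--         return st_Mapping_new
--     return _format64(_hex_value(st_Mapping_old) | _hex_value(st_Mapping_new))
-- ===== Notes on version B (the rewrite author's own statement) =====
-- stated objective: alternative
-- what changed: B replaces A's 64-iteration per-character loop (parse each hex pair, OR, re-format via hex()/lstrip, string concatenation) by building each 64-digit string's value as one big integer, OR-ing the two integers once, and formatting the result back to 64 lowercase hex digits.
import Mathlib
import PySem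

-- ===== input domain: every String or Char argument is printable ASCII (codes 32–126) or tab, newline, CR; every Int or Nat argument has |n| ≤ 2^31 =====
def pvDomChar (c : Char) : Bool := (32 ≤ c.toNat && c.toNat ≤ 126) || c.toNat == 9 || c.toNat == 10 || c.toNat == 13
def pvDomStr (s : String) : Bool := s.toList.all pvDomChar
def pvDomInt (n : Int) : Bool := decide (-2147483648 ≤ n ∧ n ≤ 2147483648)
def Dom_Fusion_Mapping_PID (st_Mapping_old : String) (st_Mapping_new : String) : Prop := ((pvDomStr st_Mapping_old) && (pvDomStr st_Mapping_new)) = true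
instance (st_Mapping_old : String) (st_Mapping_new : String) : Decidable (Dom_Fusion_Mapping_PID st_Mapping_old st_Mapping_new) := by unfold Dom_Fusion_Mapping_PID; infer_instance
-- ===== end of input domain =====

-- B replaces A's per-character hex-OR loop (with its hex()/lstrip helper) by building the two
-- 256-bit integers once, OR-ing them as whole numbers, and formatting back to 64 hex digits
-- (alternative algorithm; same return value on all inputs where A returns).


-- ===== PORT A =====

-- hex digits of m (MSB first, lowercase), [] for 0 — the digit part of Python's hex()
def pvHexDigitsAux : Nat → Nat → List Char
  | 0, _ => []
  | fuel+1, n => if n = 0 then [] else pvHexDigitsAux fuel (n/16) ++ [Nat.digitChar (n%16)]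

def pvHexDigits (n : Nat) : List Char := pvHexDigitsAux n n

-- Python hex(n): "0x" + digits (hex(0) = "0x0"), '-' prefix for negatives; exact for every int
def pvPyHex (n : Int) : List Char :=
  if n < 0 then '-' :: '0' :: 'x' :: (if n.natAbs = 0 then ['0'] else pvHexDigits n.natAbs)
  else '0' :: 'x' :: (if n.toNat = 0 then ['0'] else pvHexDigits n.toNat)

-- Masque_OU; int(s,16) is PySem.Int.ofCharsBase?; on its ValueError ([] branch) Pre_ excludes the input
def Masque_OU (car_a : List Char) (car_b : List Char) : List Char :=
  match PySem.Int.ofCharsBase? car_a 16, PySem.Int.ofCharsBase? car_b 16 with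
  | some a, some b =>
    let r := (pvPyHex (PySem.Int.bor a b)).dropWhile (fun c => c == '0' || c == 'x')  -- .lstrip("0x")
    if r.length = 0 then ['0'] else r
  | _, _ => []

def Fusion_Mapping_PID (st_Mapping_old : String) (st_Mapping_new : String) : String :=
  if PySem.Str.len st_Mapping_new = 64 then
    if PySem.Str.len st_Mapping_old ≠ 64 then st_Mapping_new
    else String.ofList ((PySem.List.pyRange 0 (PySem.Str.len st_Mapping_old) 1).foldl
      (fun st i => st ++ Masque_OU (PySem.List.slice st_Mapping_old.toList (some i) (some (i+1)))
                                   (PySem.List.slice st_Mapping_new.toList (some i) (some (i+1))))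
      ([] : List Char))
  else st_Mapping_old

-- ===== PORT B =====

-- _HEXVAL[c]; the 0 default is unreachable under Pre_ (Python raises KeyError there)
def pvHexLookup (c : Char) : Nat :=
  match c with
  | '0' => 0 | '1' => 1 | '2' => 2 | '3' => 3 | '4' => 4 | '5' => 5 | '6' => 6 | '7' => 7
  | '8' => 8 | '9' => 9
  | 'a' => 10 | 'b' => 11 | 'c' => 12 | 'd' => 13 | 'e' => 14 | 'f' => 15
  | 'A' => 10 | 'B' => 11 | 'C' => 12 | 'D' => 13 | 'E' => 14 | 'F' => 15
  | _ => 0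

def pvHexValue (cs : List Char) : Nat := cs.foldl (fun v c => 16 * v + pvHexLookup c) 0

def pvDigitsTable : List Char :=
  ['0','1','2','3','4','5','6','7','8','9','a','b','c','d','e','f']

-- _format64: 64 times push digits[v & 15] and shift v right 4 bits, then reverse
def pvFormat64 (v : Nat) : List Char :=
  ((List.range 64).foldl
    (fun (p : List Char × Nat) _ => (p.1 ++ [pvDigitsTable.getD (p.2 &&& 15) '0'], p.2 >>> 4))
    ([], v)).1.reverse

def Fusion_Mapping_PID_alt (st_Mapping_old : String) (st_Mapping_new : String) : String :=
  if PySem.Str.len st_Mapping_new ≠ 64 then st_Mapping_old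
  else if PySem.Str.len st_Mapping_old ≠ 64 then st_Mapping_new
  else String.ofList (pvFormat64 (pvHexValue st_Mapping_old.toList ||| pvHexValue st_Mapping_new.toList))

-- ===== PRECONDITION & SPEC =====

def pvIsHexChar (c : Char) : Bool :=
  (['0','1','2','3','4','5','6','7','8','9','a','b','c','d','e','f',
    'A','B','C','D','E','F'] : List Char).contains c

-- Pre_ excludes exactly the inputs where A raises: both strings of length 64 but one of them
-- containing a non-hex-digit character (int(c, 16) raises ValueError there; B raises KeyError).
def Pre_Fusion_Mapping_PID (st_Mapping_old : String) (st_Mapping_new : String) : Prop :=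
  st_Mapping_new.toList.length = 64 → st_Mapping_old.toList.length = 64 →
    (st_Mapping_old.toList.all pvIsHexChar = true ∧ st_Mapping_new.toList.all pvIsHexChar = true)

instance (st_Mapping_old : String) (st_Mapping_new : String) : Decidable (Pre_Fusion_Mapping_PID st_Mapping_old st_Mapping_new) := by unfold Pre_Fusion_Mapping_PID; infer_instance

def pvWitness_Fusion_Mapping_PID : String × String :=
  ("00000000000000000000000000000000000000000000000000000000000000ff",
   "000000000000000000000000000000000000000000000000000000000000aB3C")

def Spec_Fusion_Mapping_PID (st_Mapping_old : String) (st_Mapping_new : String) (out : String) : Prop := out = Fusion_Mapping_PID_alt st_Mapping_old st_Mapping_new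
instance (st_Mapping_old : String) (st_Mapping_new : String) (out : String) : Decidable (Spec_Fusion_Mapping_PID st_Mapping_old st_Mapping_new out) := by unfold Spec_Fusion_Mapping_PID; infer_instance

-- ===== CLAIM (what is proved, stated in full; the proofs are below) =====
def Claim_equal_Fusion_Mapping_PID : Prop := ∀ (st_Mapping_old : String) (st_Mapping_new : String), Dom_Fusion_Mapping_PID st_Mapping_old st_Mapping_new → Pre_Fusion_Mapping_PID st_Mapping_old st_Mapping_new → Spec_Fusion_Mapping_PID st_Mapping_old st_Mapping_new (Fusion_Mapping_PID st_Mapping_old st_Mapping_new)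

-- ===== LEMMAS AND PROOFS =====

-- the merged character of one column
def pvF (c d : Char) : Char := Nat.digitChar (pvHexLookup c ||| pvHexLookup d)

-- LSB-first digit list produced by B's formatting loop
def pvStuff : Nat → Nat → List Char
  | 0, _ => []
  | n+1, v => pvDigitsTable.getD (v &&& 15) '0' :: pvStuff n (v >>> 4)

lemma pv_table : ∀ k, k < 16 → pvDigitsTable.getD k '0' = Nat.digitChar k := by decide

lemma pv_hex_mem (c : Char) (h : pvIsHexChar c = true) :
    c ∈ (['0','1','2','3','4','5','6','7','8','9','a','b','c','d','e','f',
          'A','B','C','D','E','F'] : List Char) := by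
  simpa [pvIsHexChar] using h

lemma pv_parse (c : Char) (h : pvIsHexChar c = true) :
    PySem.Int.ofCharsBase? [c] 16 = some ((pvHexLookup c : Nat) : Int) ∧ pvHexLookup c < 16 := by
  have hm := pv_hex_mem c h
  fin_cases hm <;> exact ⟨by decide, by decide⟩

lemma pv_nibble : ∀ m, m < 16 →
    (if ((pvPyHex ((m : Nat) : Int)).dropWhile (fun c => c == '0' || c == 'x')).length = 0
      then ['0']
      else (pvPyHex ((m : Nat) : Int)).dropWhile (fun c => c == '0' || c == 'x')) = [Nat.digitChar m] := by
  decide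

lemma pv_or_lt (x y : Nat) (hx : x < 16) (hy : y < 16) : x ||| y < 16 := by
  have h16 : (16:Nat) = 2^4 := by norm_num
  rw [h16] at hx hy ⊢
  exact Nat.or_lt_two_pow hx hy

lemma pv_masque (c d : Char) (hc : pvIsHexChar c = true) (hd : pvIsHexChar d = true) :
    Masque_OU [c] [d] = [pvF c d] := by
  obtain ⟨hpc, hlc⟩ := pv_parse c hc
  obtain ⟨hpd, hld⟩ := pv_parse d hd
  unfold Masque_OU
  rw [hpc, hpd]
  simp only [PySem.Int.bor_natCast]
  exact pv_nibble _ (pv_or_lt _ _ hlc hld)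

lemma pv_or_split (a b x y : Nat) (hx : x < 16) (hy : y < 16) :
    (16*a + x) ||| (16*b + y) = 16*(a ||| b) + (x ||| y) := by
  have hxy : x ||| y < 16 := pv_or_lt x y hx hy
  apply Nat.eq_of_testBit_eq
  intro j
  rw [Nat.testBit_or,
      show 16*a + x = 2^4*a + x by ring_nf,
      show 16*b + y = 2^4*b + y by ring_nf,
      show 16*(a ||| b) + (x ||| y) = 2^4*(a ||| b) + (x ||| y) by ring_nf,
      Nat.testBit_two_pow_mul_add a (show x < 2^4 by omega) j,
      Nat.testBit_two_pow_mul_add b (show y < 2^4 by omega) j,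
      Nat.testBit_two_pow_mul_add (a ||| b) (show x ||| y < 2^4 by omega) j]
  by_cases hj : j < 4 <;> simp [hj, Nat.testBit_or]

lemma pv_low (m z : Nat) (hz : z < 16) : (16*m + z) &&& 15 = z := by
  rw [show (15:Nat) = 2^4 - 1 by norm_num, Nat.and_two_pow_sub_one_eq_mod,
      show (2:Nat)^4 = 16 by norm_num, Nat.mul_comm 16 m, Nat.mul_add_mod']
  exact Nat.mod_eq_of_lt hz

lemma pv_high (m z : Nat) (hz : z < 16) : (16*m + z) >>> 4 = m := by
  rw [Nat.shiftRight_eq_div_pow, show (2:Nat)^4 = 16 by norm_num,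
      Nat.mul_add_div (by norm_num) m z, Nat.div_eq_of_lt hz]
  rfl

lemma pv_hexValue_append (xs : List Char) (c : Char) :
    pvHexValue (xs ++ [c]) = 16 * pvHexValue xs + pvHexLookup c := by
  simp [pvHexValue, List.foldl_append]

lemma pv_slice_last (xs : List Char) (c : Char) :
    PySem.List.slice (xs ++ [c]) (some (xs.length : Int)) (some ((xs.length : Int) + 1)) = [c] := by
  rw [PySem.List.slice_toNat _ (by positivity) (by positivity)]
  have h1 : ((xs.length : Int) + 1).toNat = xs.length + 1 := by omega
  have h2 : ((xs.length : Int)).toNat = xs.length := by omega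
  rw [h1, h2, Nat.add_sub_cancel_left]
  rw [List.drop_append_of_le_length (le_refl _), List.drop_length]
  simp

lemma pv_slice_prefix (xs : List Char) (c : Char) (i : Int) (h0 : 0 ≤ i) (hi : i < (xs.length : Int)) :
    PySem.List.slice (xs ++ [c]) (some i) (some (i + 1)) = PySem.List.slice xs (some i) (some (i + 1)) := by
  rw [PySem.List.slice_toNat _ h0 (by omega), PySem.List.slice_toNat _ h0 (by omega)]
  have h1 : (i + 1).toNat - i.toNat = 1 := by omega
  have h2 : i.toNat ≤ xs.length := by omega
  have hlt : 1 ≤ (List.drop i.toNat xs).length := by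
    simp only [List.length_drop]; omega
  rw [h1, List.drop_append_of_le_length h2, List.take_append_of_le_length hlt]

lemma pv_A_loop : ∀ (lo ln : List Char), lo.length = ln.length →
    lo.all pvIsHexChar = true → ln.all pvIsHexChar = true →
    (PySem.List.pyRange 0 (lo.length : Int) 1).flatMap
      (fun i => Masque_OU (PySem.List.slice lo (some i) (some (i+1)))
                          (PySem.List.slice ln (some i) (some (i+1))))
      = List.zipWith pvF lo ln := by
  intro lo
  induction lo using List.reverseRecOn with
  | nil =>
    intro ln hlen _ _
    have : ln = [] := List.eq_nil_of_length_eq_zero hlen.symm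
    subst this
    simp [PySem.List.pyRange_one_eq_nil]
  | append_singleton lo' c ih =>
    intro ln hlen hho hhn
    induction ln using List.reverseRecOn with
    | nil => simp at hlen
    | append_singleton ln' d _ =>
      have hlen' : lo'.length = ln'.length := by
        simpa using hlen
      have hho' : lo'.all pvIsHexChar = true ∧ pvIsHexChar c = true := by
        simpa [List.all_append] using hho
      have hhn' : ln'.all pvIsHexChar = true ∧ pvIsHexChar d = true := by
        simpa [List.all_append] using hhn
      have hcast : (((lo' ++ [c]).length : Nat) : Int) = (lo'.length : Int) + 1 := by
        simp only [List.length_append, List.length_cons, List.length_nil]; push_cast; ring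
      rw [hcast, PySem.List.pyRange_one_succ_right (by positivity), List.flatMap_append]
      have hmap : (PySem.List.pyRange 0 (lo'.length : Int) 1).flatMap
          (fun i => Masque_OU (PySem.List.slice (lo' ++ [c]) (some i) (some (i+1)))
                              (PySem.List.slice (ln' ++ [d]) (some i) (some (i+1))))
          = (PySem.List.pyRange 0 (lo'.length : Int) 1).flatMap
          (fun i => Masque_OU (PySem.List.slice lo' (some i) (some (i+1)))
                              (PySem.List.slice ln' (some i) (some (i+1)))) := by
        apply List.flatMap_congr
        intro i hi
        have hmem := (PySem.List.mem_pyRange_one).mp hi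
        rw [pv_slice_prefix lo' c i hmem.1 hmem.2,
            pv_slice_prefix ln' d i hmem.1 (by omega)]
      rw [hmap, ih ln' hlen' hho'.1 hhn'.1]
      have hlast : Masque_OU (PySem.List.slice (lo' ++ [c]) (some (lo'.length : Int)) (some ((lo'.length : Int) + 1)))
          (PySem.List.slice (ln' ++ [d]) (some (lo'.length : Int)) (some ((lo'.length : Int) + 1))) = [pvF c d] := by
        rw [pv_slice_last]
        rw [show ((lo'.length : Nat) : Int) = ((ln'.length : Nat) : Int) from by exact_mod_cast hlen', pv_slice_last]
        exact pv_masque c d hho'.2 hhn'.2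
      simp only [List.flatMap_cons, List.flatMap_nil, List.append_nil, hlast]
      rw [List.zipWith_append hlen']
      simp [pvF]

lemma pv_foldl_iter {α β : Type} (g : α → α) : ∀ (l : List β) (a : α),
    l.foldl (fun x _ => g x) a = g^[l.length] a := by
  intro l
  induction l with
  | nil => intro a; simp
  | cons x xs ih =>
    intro a
    simp only [List.foldl_cons, List.length_cons, Function.iterate_succ_apply]
    exact ih (g a)

lemma pv_iter_fst : ∀ (n : Nat) (out : List Char) (v : Nat),
    ((fun (p : List Char × Nat) => (p.1 ++ [pvDigitsTable.getD (p.2 &&& 15) '0'], p.2 >>> 4))^[n] (out, v)).1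
      = out ++ pvStuff n v := by
  intro n
  induction n with
  | zero => intro out v; simp [pvStuff]
  | succ n ih =>
    intro out v
    rw [Function.iterate_succ_apply, ih]
    simp [pvStuff]

lemma pv_stuff_zip : ∀ (lo ln : List Char), lo.length = ln.length →
    lo.all pvIsHexChar = true → ln.all pvIsHexChar = true →
    pvStuff lo.length (pvHexValue lo ||| pvHexValue ln) = (List.zipWith pvF lo ln).reverse := by
  intro lo
  induction lo using List.reverseRecOn with
  | nil =>
    intro ln hlen _ _
    have : ln = [] := List.eq_nil_of_length_eq_zero hlen.symm
    subst this
    simp [pvStuff]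
  | append_singleton lo' c ih =>
    intro ln hlen hho hhn
    induction ln using List.reverseRecOn with
    | nil => simp at hlen
    | append_singleton ln' d _ =>
      have hlen' : lo'.length = ln'.length := by simpa using hlen
      have hho' : lo'.all pvIsHexChar = true ∧ pvIsHexChar c = true := by
        simpa [List.all_append] using hho
      have hhn' : ln'.all pvIsHexChar = true ∧ pvIsHexChar d = true := by
        simpa [List.all_append] using hhn
      have hc : pvHexLookup c < 16 := (pv_parse c hho'.2).2
      have hd : pvHexLookup d < 16 := (pv_parse d hhn'.2).2
      have hV : pvHexValue (lo' ++ [c]) ||| pvHexValue (ln' ++ [d])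
          = 16 * (pvHexValue lo' ||| pvHexValue ln') + (pvHexLookup c ||| pvHexLookup d) := by
        rw [pv_hexValue_append, pv_hexValue_append]
        exact pv_or_split _ _ _ _ hc hd
      have hlnth : (lo' ++ [c]).length = lo'.length + 1 := by simp
      rw [hlnth, hV]
      show pvDigitsTable.getD ((16 * (pvHexValue lo' ||| pvHexValue ln') + (pvHexLookup c ||| pvHexLookup d)) &&& 15) '0'
          :: pvStuff lo'.length ((16 * (pvHexValue lo' ||| pvHexValue ln') + (pvHexLookup c ||| pvHexLookup d)) >>> 4)
          = (List.zipWith pvF (lo' ++ [c]) (ln' ++ [d])).reverse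
      have hor : pvHexLookup c ||| pvHexLookup d < 16 := pv_or_lt _ _ hc hd
      rw [pv_low _ _ hor, pv_high _ _ hor, pv_table _ hor,
          ih ln' hlen' hho'.1 hhn'.1, List.zipWith_append hlen']
      simp [pvF]

-- ===== VERDICT (by name: the statement is the Claim_ definition above) =====
theorem Fusion_Mapping_PID_spec : Claim_equal_Fusion_Mapping_PID := by
  intro o n _ hpre
  unfold Spec_Fusion_Mapping_PID Fusion_Mapping_PID Fusion_Mapping_PID_alt
  rw [PySem.Str.len_eq n, PySem.Str.len_eq o]
  by_cases h1 : ((n.toList.length : Nat) : Int) = 64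
  · by_cases h2 : ((o.toList.length : Nat) : Int) = 64
    · have hn64 : n.toList.length = 64 := by omega
      have ho64 : o.toList.length = 64 := by omega
      obtain ⟨hho, hhn⟩ := hpre hn64 ho64
      have hlen : o.toList.length = n.toList.length := by omega
      have hA : (PySem.List.pyRange 0 ((o.toList.length : Nat) : Int) 1).foldl
          (fun st i => st ++ Masque_OU (PySem.List.slice o.toList (some i) (some (i+1)))
                                       (PySem.List.slice n.toList (some i) (some (i+1))))
          ([] : List Char) = List.zipWith pvF o.toList n.toList := by
        rw [PySem.List.foldl_append_eq_flatMap, List.nil_append]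
        exact pv_A_loop o.toList n.toList hlen hho hhn
      have hB : pvFormat64 (pvHexValue o.toList ||| pvHexValue n.toList)
          = List.zipWith pvF o.toList n.toList := by
        unfold pvFormat64
        rw [pv_foldl_iter (fun (p : List Char × Nat) =>
              (p.1 ++ [pvDigitsTable.getD (p.2 &&& 15) '0'], p.2 >>> 4)),
            List.length_range, pv_iter_fst, List.nil_append,
            show (64 : Nat) = o.toList.length from ho64.symm,
            pv_stuff_zip o.toList n.toList hlen hho hhn, List.reverse_reverse]
      rw [if_pos h1, if_neg (show ¬ ((o.toList.length : Nat) : Int) ≠ 64 by omega),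
          if_neg (show ¬ ((n.toList.length : Nat) : Int) ≠ 64 by omega),
          if_neg (show ¬ ((o.toList.length : Nat) : Int) ≠ 64 by omega), hA, hB]
    · rw [if_pos h1, if_pos (show ((o.toList.length : Nat) : Int) ≠ 64 from h2),
          if_neg (show ¬ ((n.toList.length : Nat) : Int) ≠ 64 by omega),
          if_pos (show ((o.toList.length : Nat) : Int) ≠ 64 from h2)]
  · rw [if_neg h1, if_pos (show ((n.toList.length : Nat) : Int) ≠ 64 from h1)]
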